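-- pv_equiv track=rewrite | github.com/NiklasBundschuh/KeyValues | header_parser.py | __parseHeaderTableKeyLine
-- ===== SOURCE A (Python) =====
-- def __parseHeaderTableKeyLine(fileLine):
--     keys = []
--     lastIdx = 0
--     currIdx = 0
--     while currIdx < len(fileLine):
--         item = fileLine[currIdx]
--         if item == ";":
--             if lastIdx < currIdx:
--                 keys.append(fileLine[lastIdx:currIdx])
--
--             lastIdx = currIdx +1
--         currIdx += 1
--
--
--     if lastIdx < currIdx:
--         keys.append(fileLine[lastIdx:currIdx])
--     return keys
-- ===== SOURCE B (Python) =====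
-- def __parseHeaderTableKeyLine(fileLine):
--     return [s for s in fileLine.split(";") if s]
-- ===== Notes on version B (the rewrite author's own statement) =====
-- stated objective: idiomatic
-- what changed: Replaces the manual index-tracking character scan (lastIdx/currIdx with explicit slicing) by a library str.split(';') followed by filtering out empty segments.
import Mathlib
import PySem

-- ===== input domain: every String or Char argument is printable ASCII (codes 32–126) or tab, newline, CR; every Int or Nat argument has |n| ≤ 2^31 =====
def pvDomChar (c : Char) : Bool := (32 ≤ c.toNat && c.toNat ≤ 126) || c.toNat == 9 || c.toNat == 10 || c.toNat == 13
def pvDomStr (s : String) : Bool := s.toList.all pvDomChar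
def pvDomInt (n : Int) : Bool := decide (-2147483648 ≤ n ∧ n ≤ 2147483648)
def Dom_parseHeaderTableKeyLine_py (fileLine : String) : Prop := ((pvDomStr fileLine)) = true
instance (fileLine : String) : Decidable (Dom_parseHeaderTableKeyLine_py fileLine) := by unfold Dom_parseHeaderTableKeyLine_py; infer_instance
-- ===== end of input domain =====

-- B replaces A's manual index-tracking character scan by split(';') plus a filter of
-- the empty segments (idiomatic; same observable behaviour, proved equal on all inputs).

-- ===== PORT A =====
-- the while-loop of A: keys, lastIdx, currIdx are the loop state, scanning code points
def pvLoopA (cs : List Char) (keys : List String) (lastIdx currIdx : Nat) : List String :=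
  if h : currIdx < cs.length then
    if cs[currIdx] = ';' then
      pvLoopA cs
        (if lastIdx < currIdx then
           keys ++ [String.ofList (PySem.Chars.slice cs (some (lastIdx : Int)) (some (currIdx : Int)))]
         else keys)
        (currIdx + 1) (currIdx + 1)
    else
      pvLoopA cs keys lastIdx (currIdx + 1)
  else
    if lastIdx < currIdx then
      keys ++ [String.ofList (PySem.Chars.slice cs (some (lastIdx : Int)) (some (currIdx : Int)))]
    else keys
termination_by cs.length - currIdx

def parseHeaderTableKeyLine_py (fileLine : String) : List String :=
  pvLoopA fileLine.toList [] 0 0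

-- ===== PORT B =====
-- B: [s for s in fileLine.split(';') if s]
def parseHeaderTableKeyLine_py_alt (fileLine : String) : List String :=
  ((PySem.Chars.splitOn fileLine.toList [';']).map String.ofList).filter (fun s => s ≠ "")

-- ===== PRECONDITION & SPEC =====
def Spec_parseHeaderTableKeyLine_py (fileLine : String) (out : List String) : Prop := out = parseHeaderTableKeyLine_py_alt fileLine
instance (fileLine : String) (out : List String) : Decidable (Spec_parseHeaderTableKeyLine_py fileLine out) := by unfold Spec_parseHeaderTableKeyLine_py; infer_instance

-- ===== CLAIM (what is proved, stated in full; the proofs are below) =====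
def Claim_equal_parseHeaderTableKeyLine_py : Prop := ∀ (fileLine : String), Dom_parseHeaderTableKeyLine_py fileLine → Spec_parseHeaderTableKeyLine_py fileLine (parseHeaderTableKeyLine_py fileLine)

-- ===== LEMMAS AND PROOFS =====

-- common specification: nonempty ';'-separated segments, with the in-progress segment 'pending'
def pvSeg : List Char → List Char → List (List Char)
  | [], pending => if pending = [] then [] else [pending]
  | c :: rest, pending =>
      if c = ';' then (if pending = [] then [] else [pending]) ++ pvSeg rest []
      else pvSeg rest (pending ++ [c])

-- ALL segments, as splitOn produces them (empty ones included)
def pvSegAll : List Char → List Char → List (List Char)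
  | [], pending => [pending]
  | c :: rest, pending =>
      if c = ';' then pending :: pvSegAll rest []
      else pvSegAll rest (pending ++ [c])

lemma pvLoopA_eq (n : Nat) : ∀ (cs : List Char) (keys : List String) (lastIdx currIdx : Nat),
    cs.length - currIdx ≤ n → lastIdx ≤ currIdx → currIdx ≤ cs.length →
    pvLoopA cs keys lastIdx currIdx =
      keys ++ (pvSeg (cs.drop currIdx) ((cs.drop lastIdx).take (currIdx - lastIdx))).map String.ofList := by
  induction n with
  | zero =>
    intro cs keys lastIdx currIdx hn h1 h2
    have hc : currIdx = cs.length := by omega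
    rw [pvLoopA]
    simp only [hc, lt_irrefl, dite_false]
    rw [List.drop_length]
    have hpend : ((cs.drop lastIdx).take (cs.length - lastIdx)).length = cs.length - lastIdx := by
      simp [List.length_take, List.length_drop]
    by_cases h : lastIdx < cs.length
    · have hne : (cs.drop lastIdx).take (cs.length - lastIdx) ≠ [] := by
        intro he; rw [he] at hpend; simp at hpend; omega
      rw [if_pos h, pvSeg, if_neg hne]
      rw [PySem.Chars.slice_eq_listSlice, PySem.List.slice_natCast]
      simp
    · have hl : lastIdx = cs.length := by omega
      have he : (cs.drop lastIdx).take (cs.length - lastIdx) = [] := by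
        simp [hl]
      rw [if_neg h, pvSeg, if_pos he]
      simp
  | succ n ih =>
    intro cs keys lastIdx currIdx hn h1 h2
    by_cases h : currIdx < cs.length
    · rw [pvLoopA, dif_pos h]
      have hdrop : cs.drop currIdx = cs[currIdx] :: cs.drop (currIdx + 1) :=
        (List.drop_eq_getElem_cons h)
      by_cases hsemi : cs[currIdx] = ';'
      · rw [if_pos hsemi, ih cs _ (currIdx+1) (currIdx+1) (by omega) (le_refl _) (by omega)]
        rw [hdrop, pvSeg, if_pos hsemi]
        have hpend : ((cs.drop lastIdx).take (currIdx - lastIdx)).length = currIdx - lastIdx := by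
          simp [List.length_take, List.length_drop]; omega
        by_cases hlt : lastIdx < currIdx
        · have hne : (cs.drop lastIdx).take (currIdx - lastIdx) ≠ [] := by
            intro he; rw [he] at hpend; simp at hpend; omega
          rw [if_pos hlt, if_neg hne, PySem.Chars.slice_eq_listSlice, PySem.List.slice_natCast]
          simp
        · have hl : lastIdx = currIdx := by omega
          have he : (cs.drop lastIdx).take (currIdx - lastIdx) = [] := by simp [hl]
          rw [if_neg hlt, if_pos he]
          simp
      · rw [if_neg hsemi, ih cs keys lastIdx (currIdx+1) (by omega) (by omega) (by omega)]
        rw [hdrop, pvSeg, if_neg hsemi]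
        have hstep : (cs.drop lastIdx).take (currIdx + 1 - lastIdx)
            = (cs.drop lastIdx).take (currIdx - lastIdx) ++ [cs[currIdx]] := by
          have h3 : currIdx + 1 - lastIdx = (currIdx - lastIdx) + 1 := by omega
          rw [h3, List.take_add_one]
          have hidx : currIdx - lastIdx < (cs.drop lastIdx).length := by
            rw [List.length_drop]; omega
          rw [List.getElem?_eq_getElem hidx]
          simp only [List.getElem_drop]
          have h4 : lastIdx + (currIdx - lastIdx) = currIdx := by omega
          simp [h4]
        rw [hstep]
    · exact ih cs keys lastIdx currIdx (by omega) h1 h2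

lemma splitOn_go_eq : ∀ (l : List Char) (fuel : Nat) (cur : List Char) (acc : List (List Char)),
    l.length ≤ fuel →
    PySem.Chars.splitOn.go [';'] fuel l cur acc = acc.reverse ++ pvSegAll l cur.reverse := by
  intro l
  induction l with
  | nil =>
    intro fuel cur acc _
    cases fuel <;> simp [PySem.Chars.splitOn.go, pvSegAll]
  | cons c rest ih =>
    intro fuel cur acc hf
    cases fuel with
    | zero => simp at hf
    | succ fuel =>
      rw [PySem.Chars.splitOn.go]
      by_cases hc : c = ';'
      · have hpre : List.isPrefixOf [';'] (c :: rest) = true := by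
          simp [List.isPrefixOf, hc]
        rw [if_pos hpre]
        have : List.drop [';'].length (c :: rest) = rest := by simp
        rw [this, ih fuel [] (cur.reverse :: acc) (by simpa using hf)]
        rw [pvSegAll, if_pos hc]
        simp
      · have hpre : ¬ List.isPrefixOf [';'] (c :: rest) = true := by
          simp [List.isPrefixOf]; exact fun h => absurd h.symm hc
        rw [if_neg hpre, ih fuel (c :: cur) acc (by simp at hf ⊢; omega)]
        rw [pvSegAll, if_neg hc]
        simp

lemma splitOn_eq (cs : List Char) : PySem.Chars.splitOn cs [';'] = pvSegAll cs [] := by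
  rw [PySem.Chars.splitOn, splitOn_go_eq cs (cs.length + 1) [] [] (by omega)]
  simp

lemma filter_pvSegAll : ∀ (l pending : List Char),
    (pvSegAll l pending).filter (fun x => x ≠ []) = pvSeg l pending := by
  intro l
  induction l with
  | nil =>
    intro pending
    by_cases h : pending = [] <;> simp [pvSegAll, pvSeg, h]
  | cons c rest ih =>
    intro pending
    by_cases hc : c = ';'
    · rw [pvSegAll, if_pos hc, pvSeg, if_pos hc, List.filter_cons]
      by_cases h : pending = [] <;> simp [h] <;> simpa using ih []
    · rw [pvSegAll, if_neg hc, pvSeg, if_neg hc, ih]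

-- ===== VERDICT (by name: the statement is the Claim_ definition above) =====
theorem parseHeaderTableKeyLine_py_spec : Claim_equal_parseHeaderTableKeyLine_py := by
  intro fileLine _
  unfold Spec_parseHeaderTableKeyLine_py parseHeaderTableKeyLine_py parseHeaderTableKeyLine_py_alt
  rw [pvLoopA_eq fileLine.toList.length fileLine.toList [] 0 0 (by omega) (by omega) (by omega)]
  rw [splitOn_eq, List.filter_map]
  rw [List.nil_append, List.drop_zero, Nat.sub_self, List.take_zero]
  congr 1
  rw [← filter_pvSegAll]
  congr 1
  funext x
  simp [Function.comp]
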